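-- pv_equiv track=rewrite | github.com/savineo/LinkCodeEdit | LinkCodeEdit.py | _tighten_punct_ws
-- ===== SOURCE A (Python) =====
-- def _tighten_punct_ws(code: str) -> str:
--     out=[]; i=0; n=len(code); in_str=False; d=''; esc=False
--     punct=set(";,:{}()[]=+-*/<>|&!%^?,.")
--     while i<n:
--         c=code[i]
--         if in_str:
--             out.append(c)
--             if esc: esc=False
--             else:
--                 if c=='\\': esc=True
--                 elif c==d: in_str=False
--             i+=1; continue
--         if c in ("'",'"','`'):
--             in_str=True; d=c; out.append(c); i+=1; continue
--         if c in punct: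
--             while out and isinstance(out[-1], str) and out[-1]==' ': out.pop()
--             out.append(c)
--             j=i+1
--             while j<n and code[j]==' ': j+=1
--             i=j; continue
--         out.append(c); i+=1
--     return ''.join(out)
-- ===== SOURCE B (Python) =====
-- _PUNCT = set(";,:{}()[]=+-*/<>|&!%^?.")
-- _QUOTES = ("'", '"', '`')
--
--
-- def _strip_ws(chunk):
--     # chunk contains no quote characters: delete each run of spaces whose
--     # immediate neighbour (either side, within the chunk) is punctuation.
--     res = []
--     k, m = 0, len(chunk)
--     while k < m:
--         if chunk[k] == ' ':
--             e = k
--             while e < m and chunk[e] == ' ':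
--                 e += 1
--             before = k > 0 and chunk[k - 1] in _PUNCT
--             after = e < m and chunk[e] in _PUNCT
--             if not (before or after):
--                 res.append(chunk[k:e])
--             k = e
--         else:
--             res.append(chunk[k])
--             k += 1
--     return ''.join(res)
--
--
-- def _tighten_punct_ws(code: str) -> str:
--     parts = []
--     i, n = 0, len(code)
--     while i < n:
--         c = code[i]
--         if c in _QUOTES:
--             j = i + 1
--             while j < n:
--                 if code[j] == '\\':
--                     j += 2
--                 elif code[j] == c:
--                     j += 1
--                     break
--                 else:
--                     j += 1
--             j = min(j, n)
--             parts.append(code[i:j])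
--             i = j
--         else:
--             j = i + 1
--             while j < n and code[j] not in _QUOTES:
--                 j += 1
--             parts.append(_strip_ws(code[i:j]))
--             i = j
--     return ''.join(parts)
-- ===== Notes on version B (the rewrite author's own statement) =====
-- stated objective: alternative
-- what changed: Replaces A's single stateful scan (with backward popping of emitted spaces and forward space-skipping after punctuation) by a two-phase decomposition: first split the input into string literals and quote-free code chunks, then inside each chunk delete every run of spaces whose immediate neighbour is punctuation.
import Mathlib
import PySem

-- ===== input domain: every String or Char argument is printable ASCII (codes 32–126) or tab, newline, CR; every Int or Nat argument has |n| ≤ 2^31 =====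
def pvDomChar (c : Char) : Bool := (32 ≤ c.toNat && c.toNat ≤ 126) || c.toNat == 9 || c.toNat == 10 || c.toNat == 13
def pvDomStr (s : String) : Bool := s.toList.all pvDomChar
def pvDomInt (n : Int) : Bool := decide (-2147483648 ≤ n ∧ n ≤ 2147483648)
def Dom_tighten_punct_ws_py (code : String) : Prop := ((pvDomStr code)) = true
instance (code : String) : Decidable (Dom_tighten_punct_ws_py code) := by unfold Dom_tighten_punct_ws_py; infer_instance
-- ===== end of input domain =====

-- B replaces A's single stateful scan by: split into string literals / quote-free chunks,
-- then in each chunk delete space runs adjacent to punctuation (alternative decomposition, same cost).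

-- ===== PORT A =====
def pvPunct : List Char :=
  [';', ',', ':', '{', '}', '(', ')', '[', ']', '=', '+', '-', '*', '/', '<', '>', '|', '&', '!', '%', '^', '?', '.']

def pvIsPunct (c : Char) : Bool := pvPunct.contains c

def pvIsQuote (c : Char) : Bool := c == '\'' || c == '"' || c == '`'

-- A's while-loop, split on the in_str flag; `out` is kept reversed (append = cons, pop = dropWhile).
mutual
def pvACode (out : List Char) (rest : List Char) : List Char :=
  match rest with
  | [] => out
  | c :: r =>
    if pvIsQuote c then pvAStr c false (c :: out) r
    else if pvIsPunct c then
      pvACode (c :: out.dropWhile (· == ' ')) (r.dropWhile (· == ' '))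
    else pvACode (c :: out) r
termination_by rest.length
decreasing_by
  · simp
  · have := List.length_dropWhile_le (fun x => x == ' ') r; simp; omega
  · simp

def pvAStr (d : Char) (esc : Bool) (out : List Char) (rest : List Char) : List Char :=
  match rest with
  | [] => out
  | c :: r =>
    if esc then pvAStr d false (c :: out) r
    else if c == '\\' then pvAStr d true (c :: out) r
    else if c == d then pvACode (c :: out) r
    else pvAStr d esc (c :: out) r
termination_by rest.length
decreasing_by all_goals simp
end

def tighten_punct_ws_py (code : String) : String :=
  String.mk ((pvACode [] code.toList).reverse)

-- ===== PORT B =====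
-- scan of one string literal after its opening quote: (content incl. closing quote, remainder)
def pvLitScan (d : Char) : List Char → List Char × List Char
  | [] => ([], [])
  | c :: r =>
    if c == '\\' then
      match r with
      | [] => ([c], [])
      | x :: r' =>
        let p := pvLitScan d r'
        (c :: x :: p.1, p.2)
    else if c == d then ([c], r)
    else
      let p := pvLitScan d r
      (c :: p.1, p.2)

-- cited by pvBMain's decreasing_by
theorem pvLitScan_len (d : Char) : ∀ l : List Char, (pvLitScan d l).2.length ≤ l.length := by
  intro l
  induction l using pvLitScan.induct d with
  | case1 => simp [pvLitScan]
  | case2 c h => simp [pvLitScan, h]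
  | case3 c h x r' ih => simp_all [pvLitScan]; omega
  | case4 c r h1 h2 => unfold pvLitScan; simp [h1, h2]
  | case5 c r h1 h2 ih => unfold pvLitScan; simp [h1, h2]; omega

-- chunk has no quotes: drop each space run whose in-chunk neighbour is punctuation
def pvStripWs (prev : Option Char) (l : List Char) : List Char :=
  match l with
  | [] => []
  | c :: r =>
    if c == ' ' then
      let run := c :: r.takeWhile (· == ' ')
      let rest := r.dropWhile (· == ' ')
      let before := match prev with | some p => pvIsPunct p | none => false
      let after := match rest.head? with | some q => pvIsPunct q | none => false
      (if before || after then [] else run) ++ pvStripWs (some ' ') rest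
    else c :: pvStripWs (some c) r
termination_by l.length
decreasing_by
  all_goals simp
  have := List.length_dropWhile_le (fun x => x == ' ') r; omega

def pvBMain (l : List Char) : List Char :=
  match l with
  | [] => []
  | c :: r =>
    if pvIsQuote c then
      let p := pvLitScan c r
      c :: p.1 ++ pvBMain p.2
    else
      let chunk := c :: r.takeWhile (fun x => !pvIsQuote x)
      let rest := r.dropWhile (fun x => !pvIsQuote x)
      pvStripWs none chunk ++ pvBMain rest
termination_by l.length
decreasing_by
  all_goals simp
  · have := pvLitScan_len c r; omega
  · have := List.length_dropWhile_le (fun x => !pvIsQuote x) r; omega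

def tighten_punct_ws_py_alt (code : String) : String :=
  String.mk (pvBMain code.toList)

-- ===== PRECONDITION & SPEC =====
def Spec_tighten_punct_ws_py (code : String) (out : String) : Prop := out = tighten_punct_ws_py_alt code
instance (code : String) (out : String) : Decidable (Spec_tighten_punct_ws_py code out) := by unfold Spec_tighten_punct_ws_py; infer_instance

-- ===== CLAIM (what is proved, stated in full; the proofs are below) =====
def Claim_equal_tighten_punct_ws_py : Prop := ∀ (code : String), Dom_tighten_punct_ws_py code → Spec_tighten_punct_ws_py code (tighten_punct_ws_py code)

-- ===== LEMMAS AND PROOFS =====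

def pvOptPunct (o : Option Char) : Bool := o.elim false pvIsPunct

-- B with the chunk split flattened away: one recursion over the whole list,
-- carrying the previous character; proved equal to pvBMain and to pvACode.
def pvBFlat (prev : Option Char) (l : List Char) : List Char :=
  match l with
  | [] => []
  | c :: r =>
    if pvIsQuote c then
      let p := pvLitScan c r
      c :: p.1 ++ pvBFlat none p.2
    else if c == ' ' then
      let run := c :: r.takeWhile (· == ' ')
      let rest := r.dropWhile (· == ' ')
      (if pvOptPunct prev || pvOptPunct rest.head? then [] else run) ++ pvBFlat (some ' ') rest
    else c :: pvBFlat (some c) r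
termination_by l.length
decreasing_by
  all_goals simp
  · have := pvLitScan_len c r; omega
  · have := List.length_dropWhile_le (fun x => x == ' ') r; omega

theorem pv_takeWhile_append_not {p : Char → Bool} {ys : List Char}
    (h : ∀ y ∈ ys.head?, p y = false) (xs : List Char) :
    (xs ++ ys).takeWhile p = xs.takeWhile p := by
  induction xs with
  | nil =>
    cases ys with
    | nil => simp
    | cons y t => simp [List.takeWhile_cons, h y (by simp)]
  | cons x xs ih => by_cases hx : p x <;> simp [List.takeWhile_cons, hx, ih]

theorem pv_dropWhile_append_not {p : Char → Bool} {ys : List Char}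
    (h : ∀ y ∈ ys.head?, p y = false) (xs : List Char) :
    (xs ++ ys).dropWhile p = xs.dropWhile p ++ ys := by
  induction xs with
  | nil =>
    cases ys with
    | nil => simp
    | cons y t => simp [List.dropWhile_cons, h y (by simp)]
  | cons x xs ih => by_cases hx : p x <;> simp [List.dropWhile_cons, hx, ih]

theorem pv_head_dropWhile (p : Char → Bool) (l : List Char) :
    ∀ y ∈ (l.dropWhile p).head?, p y = false := by
  induction l with
  | nil => simp
  | cons c r ih =>
    by_cases hc : p c
    · simpa [List.dropWhile_cons, hc] using ih
    · simp [List.dropWhile_cons, hc]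

theorem pv_dropWhile_of_head {p : Char → Bool} {l : List Char}
    (h : ∀ y ∈ l.head?, p y = false) : l.dropWhile p = l := by
  cases l with
  | nil => simp
  | cons c r => simp [List.dropWhile_cons, h c (by simp)]

-- A appends a run of spaces one by one
theorem pvACode_spaces (run : List Char) (hrun : ∀ x ∈ run, x = ' ') :
    ∀ out t, pvACode out (run ++ t) = pvACode (run.reverse ++ out) t := by
  induction run with
  | nil => intro out t; simp
  | cons x run' ih =>
    intro out t
    have hx : x = ' ' := hrun x (by simp)
    subst hx
    have hq : pvIsQuote ' ' = false := by decide
    have hp : pvIsPunct ' ' = false := by decide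
    have h1 : pvACode out ((' ' :: run') ++ t) = pvACode (' ' :: out) (run' ++ t) := by
      simp [pvACode, hq, hp]
    rw [h1, ih (fun x hx => hrun x (by simp [hx])) (' ' :: out) t]
    simp

-- A's string mode consumes exactly the literal pvLitScan finds
theorem pvAStr_litScan (d : Char) : ∀ (l out : List Char),
    pvAStr d false out l = pvACode ((pvLitScan d l).1.reverse ++ out) (pvLitScan d l).2 := by
  intro l
  induction l using pvLitScan.induct d with
  | case1 => intro out; simp [pvAStr, pvACode, pvLitScan]
  | case2 c h =>
    intro out
    have hc : c = '\\' := by simpa using h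
    subst hc
    simp [pvAStr, pvACode, pvLitScan]
  | case3 c h x r' ih =>
    intro out
    have hc : c = '\\' := by simpa using h
    subst hc
    have key : pvLitScan d ('\\' :: x :: r') = ('\\' :: x :: (pvLitScan d r').1, (pvLitScan d r').2) := by
      conv_lhs => rw [pvLitScan.eq_def]
      simp
    have h1 : pvAStr d false out ('\\' :: x :: r') = pvAStr d false (x :: '\\' :: out) r' := by
      simp [pvAStr]
    rw [h1, ih (x :: '\\' :: out), key]
    simp
  | case4 c r h1 h2 =>
    intro out
    have key : pvLitScan d (c :: r) = ([c], r) := by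
      conv_lhs => rw [pvLitScan.eq_def]
      simp [h1, h2]
    rw [key]
    simp [pvAStr, h1, h2]
  | case5 c r h1 h2 ih =>
    intro out
    have key : pvLitScan d (c :: r) = (c :: (pvLitScan d r).1, (pvLitScan d r).2) := by
      conv_lhs => rw [pvLitScan.eq_def]
      simp [h1, h2]
    have hstep : pvAStr d false out (c :: r) = pvAStr d false (c :: out) r := by
      simp [pvAStr, h1, h2]
    rw [hstep, ih (c :: out), key]
    simp

-- a terminated literal ends with its delimiter
theorem pvLitScan_last (d : Char) : ∀ l : List Char, (pvLitScan d l).2 ≠ [] →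
    (pvLitScan d l).1.getLast? = some d := by
  intro l
  induction l using pvLitScan.induct d with
  | case1 => simp [pvLitScan]
  | case2 c h => simp [pvLitScan, h]
  | case3 c h x r' ih =>
    intro hne
    have hc : c = '\\' := by simpa using h
    subst hc
    have key : pvLitScan d ('\\' :: x :: r') = ('\\' :: x :: (pvLitScan d r').1, (pvLitScan d r').2) := by
      conv_lhs => rw [pvLitScan.eq_def]
      simp
    rw [key] at hne ⊢
    simp only at hne
    have hlast := ih hne
    have hnil : (pvLitScan d r').1 ≠ [] := by
      intro h0; rw [h0] at hlast; simp at hlast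
    show (['\\', x] ++ (pvLitScan d r').1).getLast? = some d
    rw [List.getLast?_append_of_ne_nil _ hnil]
    exact hlast
  | case4 c r h1 h2 =>
    intro _
    have hc : c = d := by simpa using h2
    subst hc
    have key : pvLitScan c (c :: r) = ([c], r) := by
      conv_lhs => rw [pvLitScan.eq_def]
      simp [h1]
    rw [key]
    simp
  | case5 c r h1 h2 ih =>
    intro hne
    have key : pvLitScan d (c :: r) = (c :: (pvLitScan d r).1, (pvLitScan d r).2) := by
      conv_lhs => rw [pvLitScan.eq_def]
      simp [h1, h2]
    rw [key] at hne ⊢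
    simp only at hne
    have hlast := ih hne
    have hnil : (pvLitScan d r).1 ≠ [] := by
      intro h0; rw [h0] at hlast; simp at hlast
    show ([c] ++ (pvLitScan d r).1).getLast? = some d
    rw [List.getLast?_append_of_ne_nil _ hnil]
    exact hlast

theorem pvBFlat_prev_irrel {t : List Char} (h : t.head? ≠ some ' ') (p q : Option Char) :
    pvBFlat p t = pvBFlat q t := by
  cases t with
  | nil => simp [pvBFlat]
  | cons c r =>
    have hc : (c == ' ') = false := by
      simp only [List.head?_cons, ne_eq, Option.some.injEq] at h
      simpa using h
    simp [pvBFlat, hc]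

theorem pvBFlat_dropWhile {c : Char} (hc : pvIsPunct c = true) (l : List Char) :
    pvBFlat (some c) l = pvBFlat (some c) (l.dropWhile (· == ' ')) := by
  cases l with
  | nil => simp [pvBFlat]
  | cons x r =>
    by_cases hx : (x == ' ') = true
    · have hx' : x = ' ' := by simpa using hx
      subst hx'
      have hq : pvIsQuote ' ' = false := by decide
      have hdel : pvOptPunct (some c) = true := by simpa [pvOptPunct] using hc
      have hLHS : pvBFlat (some c) (' ' :: r) = pvBFlat (some ' ') (r.dropWhile (· == ' ')) := by
        simp [pvBFlat, hq, hdel]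
      have hh : (r.dropWhile (· == ' ')).head? ≠ some ' ' := by
        intro h0
        have := pv_head_dropWhile (· == ' ') r ' ' (by simp [h0])
        simp at this
      have hd : List.dropWhile (· == ' ') (' ' :: r) = List.dropWhile (· == ' ') r := by
        simp [List.dropWhile_cons]
      rw [hLHS, hd]
      exact pvBFlat_prev_irrel hh _ _
    · rw [List.dropWhile_cons]
      simp [hx]

theorem pvQuote_not_punct {q : Char} (h : pvIsQuote q = true) : pvIsPunct q = false := by
  simp [pvIsQuote] at h
  rcases h with (h | h) | h <;> subst h <;> decide

theorem pvQuote_ne_space {q : Char} (h : pvIsQuote q = true) : q ≠ ' ' := by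
  simp [pvIsQuote] at h
  rcases h with (h | h) | h <;> subst h <;> decide

theorem pvPunct_ne_space {q : Char} (h : pvIsPunct q = true) : q ≠ ' ' := by
  intro h0; subst h0; exact absurd h (by decide)

theorem pv_out_head {out : List Char} (hout : out.head? ≠ some ' ') :
    ∀ y ∈ out.head?, (y == ' ') = false := by
  intro y hy
  cases out with
  | nil => simp at hy
  | cons a l =>
    simp at hy
    subst hy
    simp only [List.head?_cons, ne_eq, Option.some.injEq] at hout
    simpa using hout

theorem pv_dropWhile_all_append {l : List Char}
    (h : ∀ x ∈ l, (x == ' ') = true) (out : List Char) :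
    (l ++ out).dropWhile (· == ' ') = out.dropWhile (· == ' ') := by
  induction l with
  | nil => simp
  | cons x xs ih =>
    rw [List.cons_append, List.dropWhile_cons]
    simp only [h x (by simp)]
    exact ih (fun y hy => h y (by simp [hy]))

theorem pvMain : ∀ n : ℕ, ∀ rest out : List Char, ∀ prev : Option Char,
    rest.length ≤ n → out.head? ≠ some ' ' →
    (pvOptPunct prev = true → rest.head? ≠ some ' ') →
    pvACode out rest = (pvBFlat prev rest).reverse ++ out := by
  intro n
  induction n with
  | zero =>
    intro rest out prev hlen _ _
    have hr : rest = [] := by cases rest <;> simp_all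
    subst hr
    simp [pvACode, pvBFlat]
  | succ n ih =>
    intro rest out prev hlen hout hprev
    match rest with
    | [] => simp [pvACode, pvBFlat]
    | c :: r =>
      have hlenr : r.length ≤ n := by simpa using hlen
      by_cases hq : pvIsQuote c = true
      · -- string literal
        have hstep : pvACode out (c :: r) = pvAStr c false (c :: out) r := by
          simp [pvACode, hq]
        have hBstep : pvBFlat prev (c :: r)
            = c :: (pvLitScan c r).1 ++ pvBFlat none (pvLitScan c r).2 := by
          simp [pvBFlat, hq]
        rw [hstep, pvAStr_litScan c r (c :: out), hBstep]
        by_cases hP : (pvLitScan c r).2 = []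
        · rw [hP]
          simp [pvACode, pvBFlat]
        · have hlast := pvLitScan_last c r hP
          have hnil : (pvLitScan c r).1 ≠ [] := by
            intro h0; rw [h0] at hlast; simp at hlast
          have hhead : ((pvLitScan c r).1.reverse ++ c :: out).head? ≠ some ' ' := by
            rw [List.head?_append]
            rw [List.head?_reverse, hlast]
            simp
            exact pvQuote_ne_space hq
          have hlen2 : (pvLitScan c r).2.length ≤ n :=
            le_trans (pvLitScan_len c r) hlenr
          rw [ih _ _ none hlen2 hhead (by simp [pvOptPunct])]
          simp
      · by_cases hsp : c = ' '
        · subst hsp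
          have hq0 : pvIsQuote ' ' = false := by decide
          have hrun : ∀ x ∈ (' ' :: r.takeWhile (· == ' ')), x = ' ' := by
            intro x hx
            rcases List.mem_cons.mp hx with rfl | hx
            · rfl
            · simpa using List.mem_takeWhile_imp hx
          have hsplit : (' ' :: r)
              = (' ' :: r.takeWhile (· == ' ')) ++ r.dropWhile (· == ' ') := by
            simp [List.takeWhile_append_dropWhile]
          have hA : pvACode out (' ' :: r)
              = pvACode ((' ' :: r.takeWhile (· == ' ')).reverse ++ out) (r.dropWhile (· == ' ')) := by
            conv_lhs => rw [hsplit]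
            exact pvACode_spaces _ hrun out _
          have hprevF : pvOptPunct prev = false := by
            cases hb : pvOptPunct prev
            · rfl
            · have := hprev hb
              simp at this
          have hBstep : pvBFlat prev (' ' :: r)
              = (if pvOptPunct (r.dropWhile (· == ' ')).head? then []
                 else (' ' :: r.takeWhile (· == ' ')))
                ++ pvBFlat (some ' ') (r.dropWhile (· == ' ')) := by
            simp [pvBFlat, hq0, hprevF]
          rw [hA, hBstep]
          have hlent : (r.dropWhile (· == ' ')).length ≤ r.length :=
            List.length_dropWhile_le _ _
          cases ht : r.dropWhile (· == ' ') with
          | nil => simp [ht, pvACode, pvBFlat, pvOptPunct]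
          | cons q t' =>
            have hqs : (q == ' ') = false :=
              pv_head_dropWhile (· == ' ') r q (by simp [ht])
            have hqs' : q ≠ ' ' := by simpa using hqs
            have hlent' : t'.length < n := by
              rw [ht] at hlent; simp at hlent; omega
            by_cases hqq : pvIsQuote q = true
            · -- run kept, then a string literal
              have hqp : pvOptPunct (some q) = false := by
                simp [pvOptPunct, pvQuote_not_punct hqq]
              have hA2 : pvACode ((' ' :: r.takeWhile (· == ' ')).reverse ++ out) (q :: t')
                  = pvAStr q false (q :: ((' ' :: r.takeWhile (· == ' ')).reverse ++ out)) t' := by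
                simp [pvACode, hqq]
              have hB2 : pvBFlat (some ' ') (q :: t')
                  = q :: (pvLitScan q t').1 ++ pvBFlat none (pvLitScan q t').2 := by
                simp [pvBFlat, hqq]
              rw [hA2, pvAStr_litScan q t' _, hB2]
              by_cases hP : (pvLitScan q t').2 = []
              · rw [hP]
                simp [pvACode, pvBFlat, pvOptPunct, pvQuote_not_punct hqq]
              · have hlast := pvLitScan_last q t' hP
                have hhead : ((pvLitScan q t').1.reverse ++ q :: ((' ' :: r.takeWhile (· == ' ')).reverse ++ out)).head? ≠ some ' ' := by
                  rw [List.head?_append, List.head?_reverse, hlast]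
                  simp
                  exact pvQuote_ne_space hqq
                have hlen2 : (pvLitScan q t').2.length ≤ n :=
                  le_trans (pvLitScan_len q t') (le_of_lt hlent')
                rw [ih _ _ none hlen2 hhead (by simp [pvOptPunct])]
                simp [pvOptPunct, pvQuote_not_punct hqq]
            · by_cases hqp : pvIsPunct q = true
              · -- the run is popped by the punctuation
                have hmem : ∀ x ∈ (r.takeWhile (· == ' ')).reverse, (x == ' ') = true := by
                  intro x hx
                  have hx' : x = ' ' := by
                    simpa using List.mem_takeWhile_imp (List.mem_reverse.mp hx)
                  simp [hx']
                have hdropA : List.dropWhile (· == ' ')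
                    ((r.takeWhile (· == ' ')).reverse ++ ' ' :: out) = out := by
                  rw [pv_dropWhile_all_append hmem, List.dropWhile_cons]
                  simp [pv_dropWhile_of_head (pv_out_head hout)]
                have hA2 : pvACode ((' ' :: r.takeWhile (· == ' ')).reverse ++ out) (q :: t')
                    = pvACode (q :: out) (t'.dropWhile (· == ' ')) := by
                  simp [pvACode, hqq, hqp, hdropA]
                have hB2 : pvBFlat (some ' ') (q :: t') = q :: pvBFlat (some q) t' := by
                  simp [pvBFlat, hqq, hqs]
                have hlen2 : (t'.dropWhile (· == ' ')).length ≤ n :=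
                  le_trans (List.length_dropWhile_le _ _) (le_of_lt hlent')
                have hhead : (q :: out).head? ≠ some ' ' := by
                  simp [pvPunct_ne_space hqp]
                have hprev2 : pvOptPunct (some q) = true → (t'.dropWhile (· == ' ')).head? ≠ some ' ' := by
                  intro _ h0
                  have := pv_head_dropWhile (· == ' ') t' ' ' (by simp [h0])
                  simp at this
                rw [hA2, ih _ _ (some q) hlen2 hhead hprev2, hB2, pvBFlat_dropWhile hqp t']
                simp [pvOptPunct, hqp]
              · -- run kept, ordinary character
                have hA2 : pvACode ((' ' :: r.takeWhile (· == ' ')).reverse ++ out) (q :: t')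
                    = pvACode (q :: ((' ' :: r.takeWhile (· == ' ')).reverse ++ out)) t' := by
                  simp [pvACode, hqq, hqp]
                have hB2 : pvBFlat (some ' ') (q :: t') = q :: pvBFlat (some q) t' := by
                  simp [pvBFlat, hqq, hqs]
                have hhead : (q :: ((' ' :: r.takeWhile (· == ' ')).reverse ++ out)).head? ≠ some ' ' := by
                  simp [hqs']
                have hprev2 : pvOptPunct (some q) = true → t'.head? ≠ some ' ' := by
                  intro hcon
                  simp [pvOptPunct, hqp] at hcon
                rw [hA2, ih _ _ (some q) (le_of_lt hlent') hhead hprev2, hB2]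
                simp [pvOptPunct, hqp]
        · -- c is not a quote and not a space
          have hcs : (c == ' ') = false := by simpa using hsp
          by_cases hp : pvIsPunct c = true
          · have hA2 : pvACode out (c :: r)
                = pvACode (c :: out.dropWhile (· == ' ')) (r.dropWhile (· == ' ')) := by
              simp [pvACode, hq, hp]
            rw [pv_dropWhile_of_head (pv_out_head hout)] at hA2
            have hB2 : pvBFlat prev (c :: r) = c :: pvBFlat (some c) r := by
              simp [pvBFlat, hq, hcs]
            have hlen2 : (r.dropWhile (· == ' ')).length ≤ n :=
              le_trans (List.length_dropWhile_le _ _) hlenr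
            have hhead : (c :: out).head? ≠ some ' ' := by simp [hsp]
            have hprev2 : pvOptPunct (some c) = true → (r.dropWhile (· == ' ')).head? ≠ some ' ' := by
              intro _ h0
              have := pv_head_dropWhile (· == ' ') r ' ' (by simp [h0])
              simp at this
            rw [hA2, ih _ _ (some c) hlen2 hhead hprev2, hB2, pvBFlat_dropWhile hp r]
            simp
          · have hA2 : pvACode out (c :: r) = pvACode (c :: out) r := by
              simp [pvACode, hq, hp]
            have hB2 : pvBFlat prev (c :: r) = c :: pvBFlat (some c) r := by
              simp [pvBFlat, hq, hcs]
            have hhead : (c :: out).head? ≠ some ' ' := by simp [hsp]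
            have hprev2 : pvOptPunct (some c) = true → r.head? ≠ some ' ' := by
              intro hcon
              simp [pvOptPunct, hp] at hcon
            rw [hA2, ih _ _ (some c) hlenr hhead hprev2, hB2]
            simp

theorem pvChunk : ∀ n : ℕ, ∀ chunk : List Char, chunk.length ≤ n →
    ∀ (prev : Option Char) (t : List Char),
    (∀ x ∈ chunk, pvIsQuote x = false) → (∀ y ∈ t.head?, pvIsQuote y = true) →
    pvBFlat prev (chunk ++ t) = pvStripWs prev chunk ++ pvBFlat none t := by
  intro n
  induction n with
  | zero =>
    intro chunk hlen prev t _ ht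
    have hc : chunk = [] := by cases chunk <;> simp_all
    subst hc
    simp [pvStripWs]
    apply pvBFlat_prev_irrel
    intro h0
    have := ht ' ' (by simp [h0])
    exact absurd this (by decide)
  | succ n ih =>
    intro chunk hlen prev t hchunk ht
    match chunk with
    | [] =>
      simp [pvStripWs]
      apply pvBFlat_prev_irrel
      intro h0
      have := ht ' ' (by simp [h0])
      exact absurd this (by decide)
    | c :: cr =>
      have hlenr : cr.length ≤ n := by simpa using hlen
      have hcq : pvIsQuote c = false := hchunk c (by simp)
      have hthead : ∀ y ∈ t.head?, (y == ' ') = false := by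
        intro y hy
        have := ht y hy
        have := pvQuote_ne_space this
        simpa using this
      have hopt : ∀ o : Option Char,
          (match o with | some p => pvIsPunct p | none => false) = pvOptPunct o := by
        intro o; cases o <;> rfl
      by_cases hcs : (c == ' ') = true
      · have hc' : c = ' ' := by simpa using hcs
        subst hc'
        have hq0 : pvIsQuote ' ' = false := by decide
        have htw : (cr ++ t).takeWhile (· == ' ') = cr.takeWhile (· == ' ') :=
          pv_takeWhile_append_not hthead cr
        have hdw : (cr ++ t).dropWhile (· == ' ') = cr.dropWhile (· == ' ') ++ t :=
          pv_dropWhile_append_not hthead cr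
        have hafter : pvOptPunct ((cr.dropWhile (· == ' ') ++ t).head?)
            = pvOptPunct ((cr.dropWhile (· == ' ')).head?) := by
          cases hd : cr.dropWhile (· == ' ') with
          | nil =>
            simp only [List.nil_append]
            cases ht0 : t.head? with
            | none => simp [pvOptPunct]
            | some y =>
              have hyq := ht y (by simp [ht0])
              cases t with
              | nil => simp at ht0
              | cons a t2 =>
                simp at ht0
                subst ht0
                simp [pvOptPunct, pvQuote_not_punct hyq]
          | cons a l => simp
        have hmemdrop : ∀ x ∈ cr.dropWhile (· == ' '), pvIsQuote x = false := by
          intro x hx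
          exact hchunk x (List.mem_cons_of_mem _ ((List.dropWhile_sublist _).subset hx))
        have hlen2 : (cr.dropWhile (· == ' ')).length ≤ n :=
          le_trans (List.length_dropWhile_le _ _) hlenr
        rw [List.cons_append]
        simp only [pvBFlat]
        rw [htw, hdw, hafter, ih _ hlen2 (some ' ') t hmemdrop ht]
        conv_rhs => rw [pvStripWs.eq_def]
        simp only [hopt]
        simp [hq0, pvOptPunct, List.append_assoc]
      · have hBt : pvBFlat prev ((c :: cr) ++ t) = c :: pvBFlat (some c) (cr ++ t) := by
          rw [List.cons_append]
          simp [pvBFlat, hcq, hcs]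
        have hS : pvStripWs prev (c :: cr) = c :: pvStripWs (some c) cr := by
          conv_lhs => rw [pvStripWs.eq_def]
          simp [hcs]
        rw [hBt, hS, ih _ hlenr (some c) t (fun x hx => hchunk x (by simp [hx])) ht]
        simp

theorem pvBMain_eq_flat : ∀ n : ℕ, ∀ l : List Char, l.length ≤ n →
    pvBMain l = pvBFlat none l := by
  intro n
  induction n with
  | zero =>
    intro l hlen
    have : l = [] := by cases l <;> simp_all
    subst this
    simp [pvBMain, pvBFlat]
  | succ n ih =>
    intro l hlen
    match l with
    | [] => simp [pvBMain, pvBFlat]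
    | c :: r =>
      have hlenr : r.length ≤ n := by simpa using hlen
      by_cases hq : pvIsQuote c = true
      · have hlen2 : (pvLitScan c r).2.length ≤ n :=
          le_trans (pvLitScan_len c r) hlenr
        simp [pvBMain, pvBFlat, hq, ih _ hlen2]
      · have hsplit : c :: r
            = (c :: r.takeWhile (fun x => !pvIsQuote x)) ++ r.dropWhile (fun x => !pvIsQuote x) := by
          simp [List.takeWhile_append_dropWhile]
        have hchunk : ∀ x ∈ c :: r.takeWhile (fun x => !pvIsQuote x), pvIsQuote x = false := by
          intro x hx
          rcases List.mem_cons.mp hx with rfl | hx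
          · simpa using hq
          · simpa using List.mem_takeWhile_imp hx
        have ht : ∀ y ∈ (r.dropWhile (fun x => !pvIsQuote x)).head?, pvIsQuote y = true := by
          intro y hy
          have := pv_head_dropWhile (fun x => !pvIsQuote x) r y hy
          simpa using this
        have hlen2 : (r.dropWhile (fun x => !pvIsQuote x)).length ≤ n :=
          le_trans (List.length_dropWhile_le _ _) hlenr
        have hB : pvBMain (c :: r)
            = pvStripWs none (c :: r.takeWhile (fun x => !pvIsQuote x))
              ++ pvBMain (r.dropWhile (fun x => !pvIsQuote x)) := by
          simp [pvBMain, hq]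
        rw [hB, ih _ hlen2]
        conv_rhs => rw [hsplit]
        rw [pvChunk (c :: r.takeWhile (fun x => !pvIsQuote x)).length _ le_rfl none _ hchunk ht]

-- ===== VERDICT (by name: the statement is the Claim_ definition above) =====
theorem tighten_punct_ws_py_spec : Claim_equal_tighten_punct_ws_py := by
  intro code _
  unfold Spec_tighten_punct_ws_py tighten_punct_ws_py tighten_punct_ws_py_alt
  have h := pvMain code.toList.length code.toList [] none le_rfl (by simp) (by simp [pvOptPunct])
  rw [h, pvBMain_eq_flat code.toList.length code.toList le_rfl]
  simp
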